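-- pv_equiv track=rewrite | github.com/ResolveWang/algorithm_qa | arrandmatrix/有趣的排序.py | get_first_unorder_val
-- ===== SOURCE A (Python) =====
-- import copy
--
-- def get_first_unorder_val(arr):
--     cloned_arr = copy.copy(arr)
--     cloned_arr.sort()
--     smaller_pos = -1
--     index = 0
--
--     while index < len(cloned_arr):
--         val = cloned_arr[index]
--         for pos, value in enumerate(arr):
--             if value == val:
--                 if pos >= smaller_pos:
--                     smaller_pos = pos
--                 else:
--                     return pos
--         index += 1
--
--     return -1
-- ===== SOURCE B (Python) =====
-- def get_first_unorder_val(arr):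
--     max_pos = -1
--     for p, _ in sorted(enumerate(arr), key=lambda t: t[1]):
--         if p < max_pos:
--             return p
--         max_pos = p
--     return -1
-- ===== Notes on version B (the rewrite author's own statement) =====
-- stated objective: faster
-- what changed: A rescans the whole array once per element of the sorted clone (nested loops); B stably sorts (index, value) pairs once and makes a single pass tracking the running maximum original index. Pre_ excludes arrays containing a duplicate value, on which A re-scans each copy of the value once per copy and so reports that value's first occurrence index even when the array is already sorted - an accidental corner no one would specify.
-- outside the precondition, e.g. on get_first_unorder_val([1, 1]): A returns 0, B returns -1; on get_first_unorder_val([2, 1, 1]): A returns 1, B returns 0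
import Mathlib
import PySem

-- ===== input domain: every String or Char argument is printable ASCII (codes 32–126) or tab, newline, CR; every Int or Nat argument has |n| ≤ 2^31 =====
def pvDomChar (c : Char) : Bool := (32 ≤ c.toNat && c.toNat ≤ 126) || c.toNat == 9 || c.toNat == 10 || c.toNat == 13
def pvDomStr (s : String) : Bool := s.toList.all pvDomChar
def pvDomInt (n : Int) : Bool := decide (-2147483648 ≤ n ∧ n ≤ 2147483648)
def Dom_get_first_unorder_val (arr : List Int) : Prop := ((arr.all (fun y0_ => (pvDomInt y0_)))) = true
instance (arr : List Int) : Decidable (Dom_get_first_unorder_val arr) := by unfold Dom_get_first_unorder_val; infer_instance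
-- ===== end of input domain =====

-- B replaces A's repeated full scans of the array (one per sorted element) by a stable sort of
-- (index, value) pairs followed by a single pass tracking the running maximum index (objective: faster).

-- ===== PORT A =====
-- inner 'for pos, value in enumerate(arr)' loop; .inl pos = early 'return pos', .inr s = loop ended with smaller_pos = s
def pvAInner (val : Int) : List (Int × Int) → Int → Sum Int Int
  | [], s => .inr s
  | (pos, value) :: rest, s =>
      if value == val then
        if pos ≥ s then pvAInner val rest pos else .inl pos
      else pvAInner val rest s

-- outer 'while index < len(cloned_arr)' loop, walking the sorted clone
def pvAOuter (arr : List Int) : List Int → Int → Int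
  | [], _ => -1
  | val :: rest, s =>
      match pvAInner val (PySem.List.enumerate arr 0) s with
      | .inl pos => pos
      | .inr s' => pvAOuter arr rest s'

def get_first_unorder_val (arr : List Int) : Int :=
  pvAOuter arr (PySem.List.sorted arr (fun x => x) false) (-1)

-- ===== PORT B =====
-- single pass over the stably sorted (index, value) pairs, tracking max_pos
def pvBLoop : List (Int × Int) → Int → Int
  | [], _ => -1
  | (p, _) :: rest, maxPos =>
      if p < maxPos then p else pvBLoop rest p

def get_first_unorder_val_alt (arr : List Int) : Int :=
  pvBLoop (PySem.List.sorted (PySem.List.enumerate arr 0) (fun t => t.2) false) (-1)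

-- ===== PRECONDITION & SPEC =====
-- Pre_ excludes arrays containing a duplicate value: on those A re-scans each copy of the value
-- once per copy and so reports that value's first occurrence index even when the array is already
-- sorted (e.g. [1, 1] → 0) — an accidental corner no one would specify; B returns the first
-- out-of-order original index there.
def Pre_get_first_unorder_val (arr : List Int) : Prop := arr.Nodup
instance (arr : List Int) : Decidable (Pre_get_first_unorder_val arr) := by unfold Pre_get_first_unorder_val; infer_instance
def pvWitness_get_first_unorder_val : List Int := [3, 1, 2]

def Spec_get_first_unorder_val (arr : List Int) (out : Int) : Prop := out = get_first_unorder_val_alt arr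
instance (arr : List Int) (out : Int) : Decidable (Spec_get_first_unorder_val arr out) := by unfold Spec_get_first_unorder_val; infer_instance

-- ===== CLAIM (what is proved, stated in full; the proofs are below) =====
def Claim_equal_get_first_unorder_val : Prop := ∀ (arr : List Int), Dom_get_first_unorder_val arr → Pre_get_first_unorder_val arr → Spec_get_first_unorder_val arr (get_first_unorder_val arr)

-- ===== LEMMAS AND PROOFS =====

-- the stable-sort order on (index, value) pairs: by value, ties by original index
def pvLex (a b : Int × Int) : Prop := a.2 < b.2 ∨ (a.2 = b.2 ∧ a.1 < b.1)

-- A's inner loop, restricted to the positions that actually match val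
def pvScan : List Int → Int → Sum Int Int
  | [], s => .inr s
  | p :: ps, s => if p ≥ s then pvScan ps p else .inl p

theorem pvAInner_eq_scan (val : Int) (l : List (Int × Int)) (s : Int) :
    pvAInner val l s = pvScan ((l.filter (fun q => q.2 == val)).map (·.1)) s := by
  induction l generalizing s with
  | nil => rfl
  | cons q rest ih =>
      obtain ⟨pos, value⟩ := q
      by_cases h : value == val
      · simp [pvAInner, pvScan, h]
        by_cases hp : pos ≥ s
        · simp [hp, ih]
        · simp [hp]
      · simp [pvAInner, h, ih]

-- stability of PySem's insertion sort w.r.t. pairs with strictly increasing first components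
theorem pvInsert_pairwise (x : Int × Int) (acc : List (Int × Int))
    (hp : acc.Pairwise pvLex) (hx : ∀ a ∈ acc, a.1 < x.1) :
    (PySem.List.insertBy (fun a b => decide (a.2 < b.2)) x acc).Pairwise pvLex := by
  induction acc with
  | nil => simp [PySem.List.insertBy]
  | cons y ys ih =>
      rw [List.pairwise_cons] at hp
      by_cases h : (y.2 : Int) > x.2
      · simp only [PySem.List.insertBy, decide_eq_true_eq, if_pos h]
        refine List.pairwise_cons.mpr ⟨?_, List.pairwise_cons.mpr hp⟩
        intro q hq
        rcases List.mem_cons.mp hq with rfl | hq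
        · exact Or.inl h
        · have := hp.1 q hq
          rcases this with h2 | h2
          · exact Or.inl (lt_trans h h2)
          · exact Or.inl (lt_of_lt_of_le h (le_of_eq h2.1))
      · simp only [PySem.List.insertBy, decide_eq_true_eq, if_neg h]
        refine List.pairwise_cons.mpr ⟨?_, ih hp.2 (fun a ha => hx a (by simp [ha]))⟩
        intro q hq
        rw [PySem.List.mem_insertBy] at hq
        rcases hq with rfl | hq2
        · rcases lt_or_eq_of_le (not_lt.mp h) with h2 | h2
          · exact Or.inl h2
          · exact Or.inr ⟨h2, hx y (by simp)⟩
        · exact hp.1 q hq2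

theorem pvFold_pairwise (l : List (Int × Int)) :
    ∀ acc : List (Int × Int),
    l.Pairwise (fun a b => a.1 < b.1) →
    acc.Pairwise pvLex →
    (∀ a ∈ acc, ∀ z ∈ l, a.1 < z.1) →
    (l.foldl (fun acc x => PySem.List.insertBy (fun a b => decide (a.2 < b.2)) x acc) acc).Pairwise pvLex := by
  induction l with
  | nil => intro acc _ hacc _; simpa using hacc
  | cons x l ih =>
      intro acc hl hacc hcross
      simp only [List.foldl_cons]
      refine ih _ (List.pairwise_cons.mp hl).2 ?_ ?_
      · exact pvInsert_pairwise x acc hacc (fun a ha => hcross a ha x (by simp))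
      · intro a ha z hz
        rw [PySem.List.mem_insertBy] at ha
        rcases ha with rfl | ha
        · exact (List.pairwise_cons.mp hl).1 z hz
        · exact hcross a ha z (by simp [hz])

theorem pvSorted_pairwise (arr : List Int) :
    (PySem.List.sorted (PySem.List.enumerate arr 0) (fun t => t.2) false).Pairwise pvLex := by
  rw [PySem.List.sorted_eq_foldl_insertBy]
  exact pvFold_pairwise _ [] (PySem.List.pairwise_lt_enumerate arr 0) (by simp) (by simp)

-- with distinct values, pvLex pairwise sharpens to strict increase of the values
theorem pvSorted_strict (arr : List Int) (hnd : arr.Nodup) :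
    (PySem.List.sorted (PySem.List.enumerate arr 0) (fun t => t.2) false).Pairwise
      (fun a b => a.2 < b.2) := by
  have hperm : (PySem.List.sorted (PySem.List.enumerate arr 0) (fun t => t.2) false).Perm
      (PySem.List.enumerate arr 0) := PySem.List.sorted_perm _ _ _
  have hmap : ((PySem.List.sorted (PySem.List.enumerate arr 0) (fun t => t.2) false).map (·.2)).Nodup := by
    refine (hperm.map (·.2)).nodup_iff.mpr ?_
    rwa [PySem.List.map_snd_enumerate]
  have hne : (PySem.List.sorted (PySem.List.enumerate arr 0) (fun t => t.2) false).Pairwise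
      (fun a b => a.2 ≠ b.2) := List.pairwise_map.mp hmap
  refine ((pvSorted_pairwise arr).and hne).imp ?_
  rintro a b ⟨h1, h2⟩
  rcases h1 with h | h
  · exact h
  · exact absurd h.1 h2

-- one matching pair per value: the filtered enumerate list is the singleton [(p, v)]
theorem pvFilter_singleton (arr : List Int) (pre rest : List (Int × Int)) (p v : Int)
    (hperm : (PySem.List.enumerate arr 0).Perm (pre ++ (p, v) :: rest))
    (hpair : (pre ++ (p, v) :: rest).Pairwise (fun a b => a.2 < b.2)) :
    ((PySem.List.enumerate arr 0).filter (fun q => q.2 == v)).map (·.1) = [p] := by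
  have hpre0 : pre.filter (fun q => q.2 == v) = [] := by
    rw [List.filter_eq_nil_iff]
    intro q hq
    have := (List.pairwise_append.mp hpair).2.2 q hq (p, v) (by simp)
    simp only at this
    simp only [beq_iff_eq]
    omega
  have hrest0 : rest.filter (fun q => q.2 == v) = [] := by
    rw [List.filter_eq_nil_iff]
    intro q hq
    have := (List.pairwise_cons.mp (List.pairwise_append.mp hpair).2.1).1 q hq
    simp only at this
    simp only [beq_iff_eq]
    omega
  have h := hperm.filter (fun q => q.2 == v)
  rw [List.filter_append, hpre0, List.nil_append, List.filter_cons, hrest0] at h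
  simp only [beq_self_eq_true, if_true] at h
  rw [List.perm_singleton.mp h]
  rfl

-- main loop correspondence (arr duplicate-free)
theorem pvMain (arr : List Int) (rest : List (Int × Int)) :
    ∀ (pre : List (Int × Int)) (M : Int),
    (PySem.List.enumerate arr 0).Perm (pre ++ rest) →
    (pre ++ rest).Pairwise (fun a b => a.2 < b.2) →
    pvAOuter arr (rest.map (·.2)) M = pvBLoop rest M := by
  induction rest with
  | nil =>
      intro pre M _ _
      simp [pvAOuter, pvBLoop]
  | cons hd rest' ih =>
      obtain ⟨p, v⟩ := hd
      intro pre M hperm hpair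
      have hfil := pvFilter_singleton arr pre rest' p v hperm hpair
      rw [List.map_cons]
      simp only [pvAOuter, pvBLoop]
      rw [pvAInner_eq_scan, hfil]
      by_cases hlt : p < M
      · simp [pvScan, not_le.mpr hlt, hlt]
      · have hge : M ≤ p := not_lt.mp hlt
        simp only [pvScan, ge_iff_le, if_pos hge, if_neg hlt]
        refine ih (pre ++ [(p, v)]) p ?_ ?_
        · rw [List.append_assoc]; simpa using hperm
        · rw [List.append_assoc]; simpa using hpair

-- ===== VERDICT (by name: the statement is the Claim_ definition above) =====
theorem get_first_unorder_val_spec : Claim_equal_get_first_unorder_val := by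
  intro arr _ hnd
  unfold Spec_get_first_unorder_val get_first_unorder_val get_first_unorder_val_alt
  set S := PySem.List.sorted (PySem.List.enumerate arr 0) (fun t => t.2) false with hS
  have hperm : S.Perm (PySem.List.enumerate arr 0) := PySem.List.sorted_perm _ _ _
  have hstrict : S.Pairwise (fun a b => a.2 < b.2) := pvSorted_strict arr hnd
  have hclone : PySem.List.sorted arr (fun x => x) false = S.map (·.2) := by
    refine PySem.List.sorted_id_eq_of_perm_of_pairwise arr (S.map (·.2)) ?_ ?_
    · have := hperm.map (·.2)
      rwa [PySem.List.map_snd_enumerate] at this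
    · exact List.pairwise_map.mpr (hstrict.imp le_of_lt)
  rw [hclone]
  exact pvMain arr S [] (-1) (by simpa using hperm.symm) (by simpa using hstrict)
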